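-- pv_equiv track=rewrite | github.com/chaosxlive/ProblemSolving | Leetcode/0001-1000/0901-1000/0954. Array of Doubled Pairs.py | canReorderDoubled
-- ===== SOURCE A (Python) =====
-- from typing import List
--
-- from collections import Counter
--
-- def canReorderDoubled(arr: List[int]) -> bool:
--     count = Counter(arr)
--     for key in sorted(arr, key=abs):
--         if count[key] == 0:
--             continue
--         if count[2 * key] == 0:
--             return False
--         count[key] -= 1
--         count[2 * key] -= 1
--     return True
-- ===== SOURCE B (Python) =====
-- from typing import List
-- from collections import Counter
--
-- def canReorderDoubled(arr: List[int]) -> bool: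
--     # Chain decomposition: every nonzero value belongs to one doubling chain
--     # k, 2k, 4k, ... starting at a key whose half is not present.  Walk each
--     # chain once, carrying the demand that must pair upward; no sorting needed.
--     count = Counter(arr)
--     for k in count:
--         if k % 2 == 0 and k // 2 in count:
--             continue  # not a chain head (note 0 is never a head: 0 // 2 == 0)
--         carry = 0
--         v = k
--         while v in count:
--             c = count[v]
--             if carry > c:
--                 return False
--             carry = c - carry
--             v *= 2
--         if carry != 0:
--             return False
--     return True
-- ===== Notes on version B (the rewrite author's own statement) =====
-- stated objective: faster
-- what changed: B drops the sort entirely: it decomposes the Counter's keys into doubling chains k, 2k, 4k, ... (a head is a key whose half is absent), and walks each chain once carrying the unpaired demand upward, instead of A's element-by-element greedy pass over sorted(arr, key=abs) with per-element decrements.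
import Mathlib
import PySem

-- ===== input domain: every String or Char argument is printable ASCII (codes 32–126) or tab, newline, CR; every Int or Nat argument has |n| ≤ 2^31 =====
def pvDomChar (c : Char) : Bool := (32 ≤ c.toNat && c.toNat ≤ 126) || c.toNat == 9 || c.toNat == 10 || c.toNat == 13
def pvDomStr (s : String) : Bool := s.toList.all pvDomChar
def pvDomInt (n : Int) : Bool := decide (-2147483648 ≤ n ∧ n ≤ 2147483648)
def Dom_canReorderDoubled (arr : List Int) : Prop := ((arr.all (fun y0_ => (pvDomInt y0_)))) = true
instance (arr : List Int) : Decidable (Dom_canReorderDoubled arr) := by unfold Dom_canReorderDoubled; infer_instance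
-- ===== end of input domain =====

-- B replaces A's greedy pass over sorted(arr, key=abs) by a sort-free chain
-- decomposition of the Counter's keys (walk each doubling chain k, 2k, 4k, ...
-- once, carrying the unpaired demand upward); objective: faster (no sort).

-- ===== PORT A =====
-- the for-loop of A: early `return False` ends the recursion with false
def pvLoopA (count : PySem.Dict Int Int) : List Int → Bool
  | [] => true
  | key :: rest =>
    if count.getD key 0 == 0 then pvLoopA count rest
    else if count.getD (2 * key) 0 == 0 then false
    else
      -- count[key] -= 1 ; count[2*key] -= 1  (Counter: missing key reads as 0)
      let c1 := count.insert key (count.getD key 0 - 1)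
      let c2 := c1.insert (2 * key) (c1.getD (2 * key) 0 - 1)
      pvLoopA c2 rest

def canReorderDoubled (arr : List Int) : Bool :=
  pvLoopA (PySem.Dict.counter arr) (PySem.List.sorted arr (fun y => |y|))

-- ===== PORT B =====
-- the `while v in count:` walk of one chain; fuel = count.keys.length + 1 is
-- always enough, because the visited v's are distinct keys (|v| doubles each step)
def pvChainB (count : PySem.Dict Int Int) : Nat → Int → Int → Bool
  | 0, _, _ => true
  | fuel + 1, v, carry =>
    if count.contains v then
      if carry > count.getD v 0 then false
      else pvChainB count fuel (2 * v) (count.getD v 0 - carry)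
    else carry == 0

-- the `for k in count:` loop; early `return False` ends the recursion with false
def pvLoopBKeys (count : PySem.Dict Int Int) (fuel : Nat) : List Int → Bool
  | [] => true
  | k :: rest =>
    if PySem.Int.mod k 2 == 0 && count.contains (PySem.Int.floordiv k 2) then
      pvLoopBKeys count fuel rest          -- not a chain head
    else if pvChainB count fuel k 0 then pvLoopBKeys count fuel rest
    else false

def canReorderDoubled_alt (arr : List Int) : Bool :=
  let count := PySem.Dict.counter arr
  pvLoopBKeys count (count.keys.length + 1) count.keys

-- ===== PRECONDITION & SPEC =====
def Spec_canReorderDoubled (arr : List Int) (out : Bool) : Prop := out = canReorderDoubled_alt arr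
instance (arr : List Int) (out : Bool) : Decidable (Spec_canReorderDoubled arr out) := by unfold Spec_canReorderDoubled; infer_instance

-- ===== CLAIM (what is proved, stated in full; the proofs are below) =====
def Claim_equal_canReorderDoubled : Prop := ∀ (arr : List Int), Dom_canReorderDoubled arr → Spec_canReorderDoubled arr (canReorderDoubled arr)

-- ===== LEMMAS AND PROOFS =====

-- abstract state: counts as a total function Int → Int
-- the state change of one successful A-step at key k
def pvSub (f : Int → Int) (k : Int) : Int → Int :=
  Function.update (Function.update f k (f k - 1)) (2 * k)
    ((Function.update f k (f k - 1)) (2 * k) - 1)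

lemma pvSub_apply (f : Int → Int) (k x : Int) :
    pvSub f k x =
      if x = 2 * k then (if k = 0 then f k - 2 else f (2 * k) - 1)
      else if x = k then f k - 1 else f x := by
  unfold pvSub
  simp only [Function.update_apply]
  by_cases h2 : x = 2 * k
  · subst h2
    by_cases hk : k = 0
    · subst hk
      norm_num
      omega
    · have : (2 : Int) * k ≠ k := by omega
      simp [this, hk]
  · simp [h2]

-- A's loop on the abstract state
def pvA (f : Int → Int) : List Int → Bool
  | [] => true
  | k :: rest =>
    if f k = 0 then pvA f rest
    else if f (2 * k) = 0 then false
    else pvA (pvSub f k) rest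

-- the grouped (bulk-subtraction) loop on the abstract state: an intermediate
-- stepping stone between A's per-element pass and B's chain decomposition
def pvB (f : Int → Int) : List Int → Bool
  | [] => true
  | x :: rest =>
    if f x > f (2 * x) then false
    else pvB (Function.update f (2 * x) (f (2 * x) - f x)) rest

lemma pvA_congr_tail (f : Int → Int) (a : Int) (l1 l2 : List Int)
    (h : ∀ g : Int → Int, pvA g l1 = pvA g l2) :
    pvA f (a :: l1) = pvA f (a :: l2) := by
  simp only [pvA]; split_ifs <;> first | rfl | exact h _

-- processing x and -x (x ≠ 0) touches disjoint keys, so the states commute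
lemma pvSub_comm (a : Int) (ha : a ≠ 0) (f : Int → Int) :
    pvSub (pvSub f a) (-a) = pvSub (pvSub f (-a)) a := by
  funext x
  have hna : (-a : Int) ≠ 0 := by omega
  simp only [pvSub_apply]
  split_ifs <;> omega

lemma pvA_swap (a : Int) (ha : a ≠ 0) (f : Int → Int) (t : List Int) :
    pvA f (a :: -a :: t) = pvA f (-a :: a :: t) := by
  have r1 : pvSub f a (-a) = f (-a) := by rw [pvSub_apply]; split_ifs <;> omega
  have r2 : pvSub f a (2 * -a) = f (2 * -a) := by rw [pvSub_apply]; split_ifs <;> omega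
  have r3 : pvSub f (-a) a = f a := by rw [pvSub_apply]; split_ifs <;> omega
  have r4 : pvSub f (-a) (2 * a) = f (2 * a) := by rw [pvSub_apply]; split_ifs <;> omega
  simp only [pvA, r1, r2, r3, r4]
  split_ifs <;> first | rfl | (rw [pvSub_comm a ha])

-- a (-x) can move rightwards past a block of x's
lemma pvA_move (x : Int) (hx : x ≠ 0) :
    ∀ (n : Nat) (f : Int → Int) (t : List Int),
      pvA f ((-x) :: (List.replicate n x ++ t)) = pvA f (List.replicate n x ++ (-x) :: t) := by
  intro n
  induction n with
  | zero => intro f t; rfl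
  | succ m ih =>
    intro f t
    have hnx : (-x : Int) ≠ 0 := by omega
    calc pvA f ((-x) :: (List.replicate (m+1) x ++ t))
        = pvA f ((-x) :: x :: (List.replicate m x ++ t)) := by simp [List.replicate_succ]
      _ = pvA f (x :: (-x) :: (List.replicate m x ++ t)) := by
            have := pvA_swap (-x) hnx f (List.replicate m x ++ t)
            simpa using this
      _ = pvA f (x :: (List.replicate m x ++ (-x) :: t)) := by
            exact pvA_congr_tail f x _ _ (fun g => ih g t)
      _ = pvA f (List.replicate (m+1) x ++ (-x) :: t) := by simp [List.replicate_succ]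

-- gather all occurrences of the minimal-|·|-key x to the front
lemma pvA_gather :
    ∀ (L : List Int) (f : Int → Int) (x : Int),
      L.Pairwise (fun a b => |a| ≤ |b|) →
      (∀ y ∈ L, |x| ≤ |y|) →
      pvA f L = pvA f (List.replicate (L.count x) x ++ L.filter (· != x)) := by
  intro L
  induction L with
  | nil => intro f x _ _; rfl
  | cons a L ih =>
    intro f x hp hmin
    have hpL : L.Pairwise (fun a b => |a| ≤ |b|) := hp.tail
    have hminL : ∀ y ∈ L, |x| ≤ |y| := fun y hy => hmin y (List.mem_cons_of_mem a hy)
    by_cases hax : a = x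
    · subst hax
      have hc : (a :: L).count a = L.count a + 1 := by simp
      have hf : (a :: L).filter (· != a) = L.filter (· != a) := by simp
      rw [hc, hf, List.replicate_succ, List.cons_append]
      exact pvA_congr_tail f a _ _ (fun g => ih g a hpL hminL)
    · have hc : (a :: L).count x = L.count x := by
        simp [hax]
      have hf : (a :: L).filter (· != x) = a :: L.filter (· != x) := by
        simp [hax]
      by_cases hxL : x ∈ L
      · -- a precedes x in the sorted list: |a| = |x|, a ≠ x ⇒ a = -x, x ≠ 0
        have h1 : |x| ≤ |a| := hmin a (List.mem_cons_self)
        have h2 : |a| ≤ |x| := (List.pairwise_cons.1 hp).1 x hxL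
        have habs : |a| = |x| := le_antisymm h2 h1
        have hae : a = x ∨ a = -x := abs_eq_abs.1 habs
        have hanx : a = -x := hae.resolve_left hax
        have hx0 : x ≠ 0 := by intro h; rw [h] at hanx; simp at hanx; exact hax (by rw [hanx, h])
        calc pvA f (a :: L)
            = pvA f (a :: (List.replicate (L.count x) x ++ L.filter (· != x))) :=
              pvA_congr_tail f a _ _ (fun g => ih g x hpL hminL)
          _ = pvA f (List.replicate (L.count x) x ++ a :: L.filter (· != x)) := by
              rw [hanx]; exact pvA_move x hx0 (L.count x) f (L.filter (· != x))
          _ = pvA f (List.replicate ((a :: L).count x) x ++ (a :: L).filter (· != x)) := by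
              rw [hc, hf]
      · have hc0 : L.count x = 0 := List.count_eq_zero.2 hxL
        have hf0 : L.filter (· != x) = L := List.filter_eq_self.2 (by
          intro y hy; simp; intro h; exact hxL (h ▸ hy))
        rw [hc, hf, hc0, hf0]; rfl

-- A on a block of n copies of x (x ≠ 0): r successes then skips, or failure
lemma pvA_block_nonzero (x : Int) (hx : x ≠ 0) :
    ∀ (n : Nat) (f : Int → Int) (q : List Int),
      0 ≤ f x → f x ≤ (n : Int) → 0 ≤ f (2 * x) →
      pvA f (List.replicate n x ++ q) =
        if f x ≤ f (2 * x) then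
          pvA (Function.update (Function.update f x 0) (2 * x) (f (2 * x) - f x)) q
        else false := by
  intro n
  induction n with
  | zero =>
    intro f q hr hrn hs
    have hfx : f x = 0 := le_antisymm (by exact_mod_cast hrn) hr
    have hcond : f x ≤ f (2 * x) := by omega
    rw [if_pos hcond]
    have : Function.update (Function.update f x 0) (2 * x) (f (2 * x) - f x) = f := by
      funext y
      simp only [Function.update_apply]
      split_ifs with h1 h2
      · subst h1; omega
      · subst h2; omega
      · rfl
    rw [this]; rfl
  | succ m ih =>
    intro f q hr hrn hs
    rw [List.replicate_succ, List.cons_append]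
    by_cases hr0 : f x = 0
    · have : pvA f (x :: (List.replicate m x ++ q)) = pvA f (List.replicate m x ++ q) := by
        simp [pvA, hr0]
      rw [this, ih f q hr (by omega) hs]
    · by_cases hs0 : f (2 * x) = 0
      · have hcond : ¬ f x ≤ f (2 * x) := by omega
        rw [if_neg hcond]
        simp [pvA, hr0, hs0]
      · have hstep : pvA f (x :: (List.replicate m x ++ q)) =
            pvA (pvSub f x) (List.replicate m x ++ q) := by
          simp [pvA, hr0, hs0]
        have e1 : pvSub f x x = f x - 1 := by rw [pvSub_apply]; split_ifs <;> omega
        have e2 : pvSub f x (2 * x) = f (2 * x) - 1 := by rw [pvSub_apply]; split_ifs <;> omega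
        rw [hstep, ih (pvSub f x) q (by omega) (by rw [e1]; omega) (by omega)]
        have hstate : Function.update (Function.update (pvSub f x) x 0) (2 * x)
              (pvSub f x (2 * x) - pvSub f x x) =
            Function.update (Function.update f x 0) (2 * x) (f (2 * x) - f x) := by
          funext y
          rw [e1, e2]
          simp only [Function.update_apply]
          split_ifs with h1 h2
          · omega
          · rfl
          · rw [pvSub_apply]; split_ifs; omega
        rw [hstate, e1, e2]
        by_cases hc : f x ≤ f (2 * x)
        · rw [if_pos hc, if_pos (by omega)]
        · rw [if_neg hc, if_neg (by omega)]

-- A on a block of zeros never fails; it only rewrites the count at key 0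
lemma pvA_block_zero :
    ∀ (n : Nat) (f : Int → Int) (q : List Int),
      ∃ v, pvA f (List.replicate n 0 ++ q) = pvA (Function.update f 0 v) q := by
  intro n
  induction n with
  | zero =>
    intro f q
    exact ⟨f 0, by rw [Function.update_eq_self]; rfl⟩
  | succ m ih =>
    intro f q
    rw [List.replicate_succ, List.cons_append]
    by_cases h0 : f 0 = 0
    · have : pvA f ((0:Int) :: (List.replicate m 0 ++ q)) = pvA f (List.replicate m 0 ++ q) := by
        simp [pvA, h0]
      rw [this]; exact ih f q
    · have h20 : f (2 * 0) = f 0 := by norm_num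
      have hstep : pvA f ((0:Int) :: (List.replicate m 0 ++ q)) =
          pvA (pvSub f 0) (List.replicate m 0 ++ q) := by
        simp only [pvA]
        rw [if_neg h0, if_neg (by rw [h20]; exact h0)]
      have hsub : pvSub f 0 = Function.update f 0 (f 0 - 2) := by
        funext y
        rw [pvSub_apply]
        simp only [Function.update_apply]
        split_ifs <;> omega
      obtain ⟨v, hv⟩ := ih (pvSub f 0) q
      refine ⟨v, ?_⟩
      rw [hstep, hv, hsub]
      simp [Function.update_idem]

-- the central equivalence between A's per-element loop and the grouped loop
lemma pvMain :
    ∀ (K L : List Int) (fA fB : Int → Int),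
      L.Pairwise (fun a b => |a| ≤ |b|) →
      K.Pairwise (fun a b => |a| ≤ |b|) →
      K.Nodup →
      (∀ k, k ∈ K ↔ k ∈ L) →
      (∀ k, k ≠ 0 → 0 ≤ fA k) →
      (∀ k ∈ K, fA k ≤ (L.count k : Int)) →
      (∀ k ∈ K, fA k = fB k ∧ fA (2 * k) = fB (2 * k)) →
      pvA fA L = pvB fB K := by
  intro K
  induction K with
  | nil =>
    intro L fA fB _ _ _ hmem _ _ _
    have : L = [] := List.eq_nil_iff_forall_not_mem.2 (fun k hk => by
      exact absurd ((hmem k).2 hk) (List.not_mem_nil))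
    rw [this]; rfl
  | cons x K' ih =>
    intro L fA fB hpL hpK hnd hmem hpos hle hag
    have hxK : x ∈ x :: K' := List.mem_cons_self
    have hxL : x ∈ L := (hmem x).1 hxK
    have hxK' : x ∉ K' := (List.nodup_cons.1 hnd).1
    have hK'lt : ∀ k ∈ K', |x| ≤ |k| := (List.pairwise_cons.1 hpK).1
    have hminL : ∀ y ∈ L, |x| ≤ |y| := by
      intro y hy
      rcases List.mem_cons.1 ((hmem y).2 hy) with h | h
      · simp [h]
      · exact hK'lt y h
    set L' := L.filter (· != x) with hL'
    have hpL' : L'.Pairwise (fun a b => |a| ≤ |b|) := hpL.sublist List.filter_sublist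
    have hmemL' : ∀ k, k ∈ L' ↔ (k ∈ L ∧ k ≠ x) := by
      intro k; rw [hL', List.mem_filter]; simp
    have hcntL' : ∀ k, k ≠ x → L'.count k = L.count k := by
      intro k hk
      rw [hL', List.count_filter]
      simp [hk]
    have hmem' : ∀ k, k ∈ K' ↔ k ∈ L' := by
      intro k
      constructor
      · intro h
        have hkx : k ≠ x := fun he => hxK' (he ▸ h)
        exact (hmemL' k).2 ⟨(hmem k).1 (List.mem_cons_of_mem x h), hkx⟩
      · intro h
        obtain ⟨hkL, hkx⟩ := (hmemL' k).1 h
        rcases List.mem_cons.1 ((hmem k).2 hkL) with he | h'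
        · exact absurd he hkx
        · exact h'
    have hK'0 : ∀ k ∈ K', x ≠ 0 → k ≠ 0 := by
      intro k hk hx0 hk0
      have h := hK'lt k hk
      rw [hk0, abs_zero] at h
      have := abs_pos.2 hx0
      omega
    have hgather := pvA_gather L fA x hpL hminL
    by_cases hx0 : x = 0
    · -- the zero block: A never fails, the grouped comparison count[0] > count[0] is false
      subst hx0
      obtain ⟨v, hv⟩ := pvA_block_zero (L.count 0) fA L'
      rw [hgather, hv]
      have hB : pvB fB ((0:Int) :: K') =
          pvB (Function.update fB 0 (fB 0 - fB 0)) K' := by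
        simp [pvB]
      rw [hB]
      apply ih L' (Function.update fA 0 v) (Function.update fB 0 (fB 0 - fB 0)) hpL'
        hpK.tail (List.nodup_cons.1 hnd).2 hmem'
      · intro k hk
        rw [Function.update_apply, if_neg hk]
        exact hpos k hk
      · intro k hk
        have hk0 : k ≠ 0 := fun he => hxK' (he ▸ hk)
        rw [Function.update_apply, if_neg hk0, hcntL' k hk0]
        exact hle k (List.mem_cons_of_mem _ hk)
      · intro k hk
        have hk0 : k ≠ 0 := fun he => hxK' (he ▸ hk)
        have h2k0 : (2 * k : Int) ≠ 0 := by omega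
        constructor
        · rw [Function.update_apply, Function.update_apply, if_neg hk0, if_neg hk0]
          exact (hag k (List.mem_cons_of_mem _ hk)).1
        · rw [Function.update_apply, Function.update_apply, if_neg h2k0, if_neg h2k0]
          exact (hag k (List.mem_cons_of_mem _ hk)).2
    · -- a nonzero key: block lemma on the A side, one comparison on the grouped side
      have hr : 0 ≤ fA x := hpos x hx0
      have hs : 0 ≤ fA (2 * x) := hpos (2 * x) (by omega)
      have hrn : fA x ≤ (L.count x : Int) := hle x hxK
      have hblock := pvA_block_nonzero x hx0 (L.count x) fA L' hr hrn hs
      rw [hgather, hblock]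
      have hBx : fA x = fB x := (hag x hxK).1
      have hB2x : fA (2 * x) = fB (2 * x) := (hag x hxK).2
      by_cases hc : fA x ≤ fA (2 * x)
      · rw [if_pos hc]
        have hB : pvB fB (x :: K') =
            pvB (Function.update fB (2 * x) (fB (2 * x) - fB x)) K' := by
          simp only [pvB]
          rw [if_neg (by omega)]
        rw [hB]
        set fA' := Function.update (Function.update fA x 0) (2 * x) (fA (2 * x) - fA x) with hfA'
        set fB' := Function.update fB (2 * x) (fB (2 * x) - fB x) with hfB'
        apply ih L' fA' fB' hpL' hpK.tail (List.nodup_cons.1 hnd).2 hmem'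
        · intro k hk
          rw [hfA', Function.update_apply]
          by_cases e2 : k = 2 * x
          · rw [if_pos e2]; omega
          · rw [if_neg e2, Function.update_apply]
            by_cases e1 : k = x
            · rw [if_pos e1]
            · rw [if_neg e1]; exact hpos k hk
        · intro k hk
          have hkx : k ≠ x := fun he => hxK' (he ▸ hk)
          rw [hcntL' k hkx, hfA', Function.update_apply]
          by_cases e2 : k = 2 * x
          · rw [if_pos e2]
            subst e2
            have h2 := hle (2 * x) (List.mem_cons_of_mem x hk)
            omega
          · rw [if_neg e2, Function.update_apply, if_neg hkx]
            exact hle k (List.mem_cons_of_mem _ hk)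
        · intro k hk
          have hkx : k ≠ x := fun he => hxK' (he ▸ hk)
          have hk0 : k ≠ 0 := hK'0 k hk hx0
          have hxabs : |x| ≤ |k| := hK'lt k hk
          have h2kx : 2 * k ≠ x := by
            intro he
            have habs : |2 * k| = |x| := by rw [he]
            rw [abs_mul] at habs
            have h2 : |(2 : Int)| = 2 := by norm_num
            rw [h2] at habs
            have h3 : 0 < |k| := abs_pos.2 hk0
            omega
          have h2k2x : (2 * k : Int) ≠ 2 * x := by omega
          have hagk := hag k (List.mem_cons_of_mem _ hk)
          constructor
          · rw [hfA', hfB']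
            simp only [Function.update_apply]
            by_cases e2 : k = 2 * x
            · rw [if_pos e2, if_pos e2]
              omega
            · rw [if_neg e2, if_neg e2, if_neg hkx]
              exact hagk.1
          · rw [hfA', hfB']
            simp only [Function.update_apply]
            rw [if_neg h2k2x, if_neg h2k2x, if_neg h2kx]
            exact hagk.2
      · rw [if_neg hc]
        simp only [pvB]
        rw [if_pos (by omega)]

-- simulation: the Dict loop of port A computes the abstract loop
lemma pvSimA :
    ∀ (L : List Int) (d : PySem.Dict Int Int) (f : Int → Int),
      (∀ k, d.getD k 0 = f k) →
      pvLoopA d L = pvA f L := by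
  intro L
  induction L with
  | nil => intro d f h; rfl
  | cons k rest ih =>
    intro d f h
    simp only [pvLoopA, pvA, h k, h (2 * k), beq_iff_eq]
    split_ifs with h1 h2
    · exact ih d f h
    · rfl
    · apply ih
      intro k'
      rw [pvSub_apply]
      by_cases e2 : k' = 2 * k
      · rw [if_pos e2]
        subst e2
        rw [PySem.Dict.getD_insert_self]
        by_cases e0 : k = 0
        · rw [if_pos e0]
          subst e0
          norm_num
          omega
        · rw [if_neg e0]
          rw [PySem.Dict.getD_insert_of_ne _ _ _ (by omega : (2 * k : Int) ≠ k), h (2 * k)]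
      · rw [if_neg e2, PySem.Dict.getD_insert_of_ne _ _ _ e2]
        by_cases e1 : k' = k
        · rw [if_pos e1]
          subst e1
          rw [PySem.Dict.getD_insert_self]
        · rw [if_neg e1, PySem.Dict.getD_insert_of_ne _ _ _ e1, h k']

-- ======== the chain-decomposition side ========

-- abstract membership, chain walk, head test, per-key conjunct, whole pass
def aMem (K : List Int) (v : Int) : Bool := K.contains v

def aChain (K : List Int) (f : Int → Int) : Nat → Int → Int → Bool
  | 0, _, _ => true
  | n + 1, v, c =>
    if aMem K v then
      if c > f v then false else aChain K f n (2 * v) (f v - c)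
    else c == 0

def aHead (K : List Int) (k : Int) : Bool :=
  !(PySem.Int.mod k 2 == 0 && aMem K (PySem.Int.floordiv k 2))

def aConj (K : List Int) (f : Int → Int) (F : Nat) (k : Int) : Bool :=
  !(aHead K k) || aChain K f F k 0

def aAll (K : List Int) (f : Int → Int) (F : Nat) (ks : List Int) : Bool :=
  ks.all (aConj K f F)

lemma pvMem_aMem (K : List Int) (v : Int) : aMem K v = decide (v ∈ K) := by
  simp [aMem]

-- Bool List.all congruence / permutation invariance
lemma pvAll_congr (l : List Int) (p q : Int → Bool) (h : ∀ x ∈ l, p x = q x) :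
    l.all p = l.all q := by
  induction l with
  | nil => rfl
  | cons a l ih =>
    simp only [List.all_cons]
    rw [h a List.mem_cons_self, ih (fun x hx => h x (List.mem_cons_of_mem a hx))]

lemma pvAll_perm (l l' : List Int) (p : Int → Bool) (h : l.Perm l') :
    l.all p = l'.all p := by
  rw [Bool.eq_iff_iff]
  simp only [List.all_eq_true]
  exact ⟨fun hh x hx => hh x (h.mem_iff.2 hx), fun hh x hx => hh x (h.mem_iff.1 hx)⟩

-- counting measure for chain-walk fuel
def pvM (K : List Int) (v : Int) : Nat := K.countP (fun k => decide (v.natAbs ≤ k.natAbs))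

lemma pvM_le (K : List Int) (v : Int) : pvM K v ≤ K.length := List.countP_le_length

lemma pvCountP_lt (p q : Int → Bool) :
    ∀ (l : List Int), (∀ x ∈ l, q x = true → p x = true) →
      ∀ x ∈ l, p x = true → q x = false → l.countP q < l.countP p := by
  intro l
  induction l with
  | nil => intro _ x hx; exact absurd hx List.not_mem_nil
  | cons a l ih =>
    intro hmono x hx hp hq
    rw [List.countP_cons, List.countP_cons]
    rcases List.mem_cons.1 hx with heq | hx'
    · subst heq
      rw [hq, hp]
      have h1 : l.countP q ≤ l.countP p := List.countP_mono_left (fun y hy => hmono y (List.mem_cons_of_mem _ hy))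
      simp only [Bool.false_eq_true, if_false, if_true]
      omega
    · have h1 := ih (fun y hy hqy => hmono y (List.mem_cons_of_mem _ hy) hqy) x hx' hp hq
      have h2 : (if q a then 1 else 0) ≤ (if p a then 1 else 0) := by
        by_cases hqa : q a = true
        · rw [hmono a List.mem_cons_self hqa, hqa]
        · simp only [Bool.not_eq_true] at hqa
          rw [hqa]; simp
      omega

lemma pvM_lt (K : List Int) (v : Int) (hv : v ≠ 0) (hm : v ∈ K) :
    pvM K (2 * v) < pvM K v := by
  unfold pvM
  apply pvCountP_lt _ _ K _ v hm
  · simp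
  · have : (2 * v).natAbs = 2 * v.natAbs := by simp [Int.natAbs_mul]
    have hv' : v.natAbs ≠ 0 := Int.natAbs_ne_zero.2 hv
    simp only [this, decide_eq_false_iff_not]
    omega
  · intro x _ hx
    simp only [decide_eq_true_eq] at hx ⊢
    have : (2 * v).natAbs = 2 * v.natAbs := by simp [Int.natAbs_mul]
    omega

-- a chain walk only looks at its nodes v·2^i: congruence in context, counts and fuel
lemma pvChain_ext :
    ∀ (n m : Nat) (K₁ K₂ : List Int) (f₁ f₂ : Int → Int) (v c : Int),
      v ≠ 0 →
      (∀ i : Nat, aMem K₁ (v * 2 ^ i) = aMem K₂ (v * 2 ^ i)) →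
      (∀ i : Nat, v * 2 ^ i ∈ K₁ → f₁ (v * 2 ^ i) = f₂ (v * 2 ^ i)) →
      pvM K₁ v < n → pvM K₂ v < m →
      aChain K₁ f₁ n v c = aChain K₂ f₂ m v c := by
  intro n
  induction n with
  | zero => intro m K₁ K₂ f₁ f₂ v c _ _ _ h1 _; omega
  | succ n' ih =>
    intro m K₁ K₂ f₁ f₂ v c hv hmem hf h1 h2
    cases m with
    | zero => omega
    | succ m' =>
      have h00 := hmem 0
      simp only [pow_zero, mul_one] at h00
      simp only [aChain]
      cases hm1 : aMem K₁ v with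
      | false => rw [← h00, hm1, if_neg Bool.false_ne_true, if_neg Bool.false_ne_true]
      | true =>
        rw [← h00, hm1, if_pos rfl, if_pos rfl]
        have hvK₁ : v ∈ K₁ := by
          have := pvMem_aMem K₁ v
          rw [hm1] at this
          exact of_decide_eq_true this.symm
        have hvK₂ : v ∈ K₂ := by
          have := pvMem_aMem K₂ v
          rw [← h00, hm1] at this
          exact of_decide_eq_true this.symm
        have hf0 := hf 0 (by simpa using hvK₁)
        simp only [pow_zero, mul_one] at hf0
        rw [← hf0]
        by_cases hc : c > f₁ v
        · rw [if_pos hc, if_pos hc]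
        · rw [if_neg hc, if_neg hc]
          apply ih
          · omega
          · intro i
            have e : 2 * v * 2 ^ i = v * 2 ^ (i+1) := by ring
            rw [e]; exact hmem (i+1)
          · intro i hi
            have e : 2 * v * 2 ^ i = v * 2 ^ (i+1) := by ring
            rw [e] at hi ⊢; exact hf (i+1) hi
          · have := pvM_lt K₁ v hv hvK₁
            omega
          · have := pvM_lt K₂ v hv hvK₂
            omega

-- node-avoidance arithmetic
lemma pvNode_ne (k x : Int) (i : Nat) (hk0 : k ≠ 0) (hkx : k ≠ x)
    (habs : x.natAbs ≤ k.natAbs) : k * 2 ^ i ≠ x := by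
  intro h
  have h' := congrArg Int.natAbs h
  simp only [Int.natAbs_mul, Int.natAbs_pow, show ((2:Int).natAbs) = 2 from rfl] at h'
  have hk' : k.natAbs ≠ 0 := Int.natAbs_ne_zero.2 hk0
  cases i with
  | zero => simp at h; exact hkx h
  | succ j =>
    have ht : 2 ≤ 2 ^ (j+1) := by
      calc 2 = 2 ^ 1 := (pow_one 2).symm
        _ ≤ 2 ^ (j+1) := Nat.pow_le_pow_right (by norm_num) (by omega)
    have h4 : k.natAbs * 2 ≤ k.natAbs * 2 ^ (j+1) := Nat.mul_le_mul_left _ ht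
    rw [h'] at h4
    omega

lemma pvNode_ne2 (k x : Int) (i : Nat) (hx0 : x ≠ 0) (hkx : k ≠ x) (hk2x : k ≠ 2 * x)
    (habs : x.natAbs ≤ k.natAbs) : k * 2 ^ i ≠ 2 * x := by
  intro h
  have hk' : k.natAbs ≠ 0 := by
    intro h0
    have hk0 : k = 0 := Int.natAbs_eq_zero.1 h0
    rw [hk0, zero_mul] at h
    exact hx0 (by omega)
  have h' := congrArg Int.natAbs h
  simp only [Int.natAbs_mul, Int.natAbs_pow, show ((2:Int).natAbs) = 2 from rfl] at h'
  cases i with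
  | zero => simp at h; exact hk2x h
  | succ j =>
    cases j with
    | zero =>
      rw [pow_one] at h
      exact hkx (by omega)
    | succ j' =>
      have ht : 4 ≤ 2 ^ (j'+2) := by
        calc 4 = 2 ^ 2 := by norm_num
          _ ≤ 2 ^ (j'+2) := Nat.pow_le_pow_right (by norm_num) (by omega)
      have h4 : k.natAbs * 4 ≤ k.natAbs * 2 ^ (j'+2) := Nat.mul_le_mul_left _ ht
      rw [h'] at h4
      have hx' : x.natAbs ≠ 0 := Int.natAbs_ne_zero.2 hx0
      omega

lemma pvXnode_ne (x : Int) (hx : x ≠ 0) (i : Nat) :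
    2 * (2 * x) * 2 ^ i ≠ x ∧ 2 * (2 * x) * 2 ^ i ≠ 2 * x := by
  have hx' : x.natAbs ≠ 0 := Int.natAbs_ne_zero.2 hx
  have h3 : (1:Nat) ≤ 2 ^ i := Nat.one_le_two_pow
  constructor
  · intro h
    have h' := congrArg Int.natAbs h
    simp only [Int.natAbs_mul, Int.natAbs_pow, show ((2:Int).natAbs) = 2 from rfl] at h'
    have h'' : 4 * x.natAbs * 2 ^ i = x.natAbs := by
      calc 4 * x.natAbs * 2 ^ i = 2 * (2 * x.natAbs) * 2 ^ i := by ring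
        _ = x.natAbs := h'
    have h5 : 4 * x.natAbs ≤ x.natAbs := by
      calc 4 * x.natAbs = 4 * x.natAbs * 1 := by ring
        _ ≤ 4 * x.natAbs * 2 ^ i := Nat.mul_le_mul_left _ h3
        _ = x.natAbs := h''
    omega
  · intro h
    have h' := congrArg Int.natAbs h
    simp only [Int.natAbs_mul, Int.natAbs_pow, show ((2:Int).natAbs) = 2 from rfl] at h'
    have h'' : 4 * x.natAbs * 2 ^ i = 2 * x.natAbs := by
      calc 4 * x.natAbs * 2 ^ i = 2 * (2 * x.natAbs) * 2 ^ i := by ring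
        _ = 2 * x.natAbs := h'
    have h5 : 4 * x.natAbs ≤ 2 * x.natAbs := by
      calc 4 * x.natAbs = 4 * x.natAbs * 1 := by ring
        _ ≤ 4 * x.natAbs * 2 ^ i := Nat.mul_le_mul_left _ h3
        _ = 2 * x.natAbs := h''
    omega

lemma pvMem_cons_ne (x : Int) (K : List Int) (w : Int) (h : w ≠ x) :
    aMem (x :: K) w = aMem K w := by
  rw [pvMem_aMem, pvMem_aMem, decide_eq_decide]
  simp [List.mem_cons, h]

lemma pvHead_congr (K₁ K₂ : List Int) (k : Int)
    (hmem : (PySem.Int.mod k 2 == 0) = true →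
      aMem K₁ (PySem.Int.floordiv k 2) = aMem K₂ (PySem.Int.floordiv k 2)) :
    aHead K₁ k = aHead K₂ k := by
  unfold aHead
  cases hpar : (PySem.Int.mod k 2 == 0)
  · simp
  · rw [hmem hpar]

lemma pvConj_congr (K₁ K₂ : List Int) (f₁ f₂ : Int → Int) (F₁ F₂ : Nat) (k : Int)
    (hhead : aHead K₁ k = aHead K₂ k)
    (hchain : aChain K₁ f₁ F₁ k 0 = aChain K₂ f₂ F₂ k 0) :
    aConj K₁ f₁ F₁ k = aConj K₂ f₂ F₂ k := by
  unfold aConj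
  rw [hhead, hchain]

-- Python's k % 2 / k // 2 on the even test
lemma pvPar (k : Int) (h : (PySem.Int.mod k 2 == 0) = true) :
    2 * PySem.Int.floordiv k 2 = k := by
  rw [PySem.Int.floordiv_eq_ediv_of_pos (by norm_num)]
  rw [PySem.Int.mod_eq_emod_of_pos (by norm_num)] at h
  simp at h
  omega

lemma pvFloordiv_double (x : Int) : PySem.Int.floordiv (2 * x) 2 = x := by
  rw [PySem.Int.floordiv_eq_ediv_of_pos (by norm_num)]; omega

lemma pvMod_double (x : Int) : (PySem.Int.mod (2 * x) 2 == 0) = true := by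
  rw [PySem.Int.mod_eq_emod_of_pos (by norm_num)]; simp


lemma pvAbsLe (a b : Int) (h : |a| ≤ |b|) : a.natAbs ≤ b.natAbs := by
  rw [Int.abs_eq_natAbs, Int.abs_eq_natAbs] at h
  exact_mod_cast h

lemma pvMem_true {K : List Int} {v : Int} (h : v ∈ K) : aMem K v = true := by
  rw [pvMem_aMem]; simp [h]

lemma pvMem_false {K : List Int} {v : Int} (h : v ∉ K) : aMem K v = false := by
  rw [pvMem_aMem]; simp [h]

lemma aChain_succ_mem (K : List Int) (f : Int → Int) (n : Nat) (v c : Int) (hv : v ∈ K) :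
    aChain K f (n+1) v c = if c > f v then false else aChain K f n (2*v) (f v - c) := by
  simp only [aChain, pvMem_true hv]
  simp

lemma aChain_succ_not_mem (K : List Int) (f : Int → Int) (n : Nat) (v c : Int) (hv : v ∉ K) :
    aChain K f (n+1) v c = (c == 0) := by
  simp only [aChain, pvMem_false hv]
  simp

lemma pvHead_of_half_not_mem (K : List Int) (k : Int) (h : ∀ m, 2*m = k → m ∉ K) :
    aHead K k = true := by
  unfold aHead
  cases hpar : (PySem.Int.mod k 2 == 0) with
  | false => simp
  | true =>
    have hpk := pvPar k hpar
    have hm := h _ hpk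
    rw [pvMem_false hm]
    simp

lemma pvHead_double_mem (K : List Int) (x : Int) (hx : x ∈ K) : aHead K (2*x) = false := by
  unfold aHead
  rw [pvMod_double, pvFloordiv_double, pvMem_true hx]
  simp

lemma aConj_of_head_false {K : List Int} {k : Int} (f : Int → Int) (F : Nat)
    (h : aHead K k = false) : aConj K f F k = true := by
  unfold aConj; rw [h]; simp

lemma aConj_of_head_true {K : List Int} {k : Int} (f : Int → Int) (F : Nat)
    (h : aHead K k = true) : aConj K f F k = aChain K f F k 0 := by
  unfold aConj; rw [h]; simp

-- the main new equivalence: the grouped loop over the abs-sorted distinct keys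
-- equals the chain decomposition over the same keys
lemma pvBulkChains :
    ∀ (K : List Int) (f : Int → Int) (F : Nat),
      K.Pairwise (fun a b => |a| ≤ |b|) → K.Nodup →
      (∀ k ∈ K, 0 ≤ f k) →
      (∀ y ∈ K, (2 * y) ∉ K → f (2 * y) = 0) →
      K.length < F →
      pvB f K = aAll K f F K := by
  intro K
  induction K with
  | nil => intro f F _ _ _ _ _; rfl
  | cons x K' ih =>
    intro f F hp hnd hpos hzero hF
    have hminA : ∀ y ∈ K', |x| ≤ |y| := (List.pairwise_cons.1 hp).1
    have hmin : ∀ y ∈ K', x.natAbs ≤ y.natAbs := fun y hy => pvAbsLe _ _ (hminA y hy)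
    have hxK' : x ∉ K' := (List.nodup_cons.1 hnd).1
    have hndK' : K'.Nodup := (List.nodup_cons.1 hnd).2
    have hpK' := hp.tail
    have hlen : (x :: K').length = K'.length + 1 := rfl
    obtain ⟨F', rfl⟩ : ∃ F', F = F' + 1 := ⟨F - 1, by omega⟩
    simp only [pvB, aAll, List.all_cons]
    by_cases hx0 : x = 0
    · -- x = 0 : A key-0 step never fails and its chain is never walked
      subst hx0
      have hhead0 : aHead ((0:Int) :: K') 0 = false := by
        have := pvHead_double_mem ((0:Int) :: K') 0 List.mem_cons_self
        simpa using this
      rw [aConj_of_head_false _ _ hhead0]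
      rw [show ((2:Int) * 0) = 0 from by norm_num]
      rw [if_neg (lt_irrefl _)]
      rw [Bool.true_and]
      have hih := ih (Function.update f 0 (f 0 - f 0)) (F' + 1) hpK' hndK'
        (by
          intro k hk
          have hk0 : k ≠ 0 := fun he => hxK' (he ▸ hk)
          rw [Function.update_apply, if_neg hk0]
          exact hpos k (List.mem_cons_of_mem _ hk))
        (by
          intro y hy h2y
          have hy0 : y ≠ 0 := fun he => hxK' (he ▸ hy)
          have h2y0 : (2*y : Int) ≠ 0 := by omega
          rw [Function.update_apply, if_neg h2y0]
          apply hzero y (List.mem_cons_of_mem _ hy)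
          intro hmem
          rcases List.mem_cons.1 hmem with he | he
          · exact h2y0 he
          · exact h2y he)
        (by simp at hF; omega)
      rw [hih]
      unfold aAll
      symm
      apply pvAll_congr
      intro k hk
      have hk0 : k ≠ 0 := fun he => hxK' (he ▸ hk)
      apply pvConj_congr
      · apply pvHead_congr
        intro hpar
        have hpk := pvPar k hpar
        have hfd0 : PySem.Int.floordiv k 2 ≠ 0 := by
          intro h0; rw [h0] at hpk; exact hk0 (by omega)
        exact pvMem_cons_ne _ _ _ hfd0
      · apply pvChain_ext _ _ _ _ _ _ _ _ hk0
        · intro i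
          have hne : k * 2 ^ i ≠ 0 := mul_ne_zero hk0 (pow_ne_zero _ (by norm_num))
          exact pvMem_cons_ne _ _ _ hne
        · intro i _
          have hne : k * 2 ^ i ≠ 0 := mul_ne_zero hk0 (pow_ne_zero _ (by norm_num))
          rw [Function.update_apply, if_neg hne]
        · have h1 := pvM_le ((0:Int) :: K') k
          simp at hF
          rw [hlen] at h1
          omega
        · have h1 := pvM_le K' k
          simp at hF
          omega
    · -- x ≠ 0 : x is a chain head (its half cannot be a key)
      have h0K' : (0:Int) ∉ K' := by
        intro h
        have := hmin 0 h
        simp at this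
        exact hx0 (Int.natAbs_eq_zero.1 (by omega))
      have hxmem : x ∈ x :: K' := List.mem_cons_self
      have hheadx : aHead (x :: K') x = true := by
        apply pvHead_of_half_not_mem
        intro m hm hmK
        have hm0 : m ≠ 0 := by intro h; rw [h] at hm; exact hx0 (by omega)
        have habs : x.natAbs = 2 * m.natAbs := by
          rw [← hm, Int.natAbs_mul]
          simp
        rcases List.mem_cons.1 hmK with he | he
        · rw [he] at hm; exact hx0 (by omega)
        · have h1 := hmin m he
          have h2 : m.natAbs ≠ 0 := Int.natAbs_ne_zero.2 hm0
          omega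
      rw [aConj_of_head_true _ _ hheadx]
      rw [aChain_succ_mem _ _ _ _ _ hxmem]
      have hfx0 : 0 ≤ f x := hpos x hxmem
      rw [if_neg (by omega : ¬ (0 : Int) > f x), sub_zero]
      have h2xnex : (2*x : Int) ≠ x := by omega
      have h2y_notmem : ∀ y ∈ K', (2*y : Int) ≠ x := by
        intro y hy he
        have hy0 : y ≠ 0 := fun h => h0K' (h ▸ hy)
        have h1 : x.natAbs = 2 * y.natAbs := by rw [← he, Int.natAbs_mul]; simp
        have h2 := hmin y hy
        have h3 : y.natAbs ≠ 0 := Int.natAbs_ne_zero.2 hy0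
        omega
      by_cases h2xK' : (2*x) ∈ K'
      · -- the chain continues inside the keys
        have h2xK : (2*x) ∈ x :: K' := List.mem_cons_of_mem _ h2xK'
        have hK'len : 1 ≤ K'.length := List.length_pos_of_mem h2xK'
        obtain ⟨F'', rfl⟩ : ∃ F'', F' = F'' + 1 := ⟨F' - 1, by rw [hlen] at hF; omega⟩
        rw [aChain_succ_mem _ _ _ _ _ h2xK]
        by_cases hcmp : f x > f (2*x)
        · simp only [if_pos hcmp]
          rw [Bool.false_and]
        · simp only [if_neg hcmp]
          set f' := Function.update f (2*x) (f (2*x) - f x) with hf'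
          have hf'app : ∀ w, w ≠ 2*x → f' w = f w := by
            intro w hw; rw [hf', Function.update_apply, if_neg hw]
          have hf'2x : f' (2*x) = f (2*x) - f x := by rw [hf', Function.update_self]
          have hih := ih f' (F'' + 2) hpK' hndK'
            (by
              intro k hk
              by_cases he : k = 2*x
              · rw [he, hf'2x]; omega
              · rw [hf'app k he]; exact hpos k (List.mem_cons_of_mem _ hk))
            (by
              intro y hy h2y
              have hy0 : y ≠ 0 := fun h => h0K' (h ▸ hy)
              have h2ynex : (2*y : Int) ≠ x := h2y_notmem y hy
              have h2yne2x : (2*y : Int) ≠ 2*x := by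
                intro he
                have hyx : y = x := by omega
                exact hxK' (hyx ▸ hy)
              rw [hf'app _ h2yne2x]
              apply hzero y (List.mem_cons_of_mem _ hy)
              intro hmem
              rcases List.mem_cons.1 hmem with he | he
              · exact h2ynex he
              · exact h2y he)
            (by rw [hlen] at hF; omega)
          rw [hih]
          -- split the key 2*x out of K' on both sides
          have hperm : K'.Perm (2*x :: K'.erase (2*x)) := List.perm_cons_erase h2xK'
          set E := K'.erase (2*x) with hE
          have hEmem : ∀ k, k ∈ E → k ∈ K' ∧ k ≠ 2*x := by
            intro k hk
            have := (List.Nodup.mem_erase_iff hndK').1 hk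
            exact ⟨this.2, this.1⟩
          -- pointwise agreement of the conjuncts away from x and 2*x
          have hconj : ∀ k ∈ E, aConj (x :: K') f (F''+2) k = aConj K' f' (F''+2) k := by
            intro k hk
            obtain ⟨hkK', hkne2x⟩ := hEmem k hk
            have hk0 : k ≠ 0 := fun h => h0K' (h ▸ hkK')
            have hkx : k ≠ x := fun h => hxK' (h ▸ hkK')
            apply pvConj_congr
            · apply pvHead_congr
              intro hpar
              have hpk := pvPar k hpar
              have hfdx : PySem.Int.floordiv k 2 ≠ x := by
                intro h0; rw [h0] at hpk; exact hkne2x (by omega)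
              exact pvMem_cons_ne _ _ _ hfdx
            · apply pvChain_ext _ _ _ _ _ _ _ _ hk0
              · intro i
                exact pvMem_cons_ne _ _ _ (pvNode_ne k x i hk0 hkx (hmin k hkK'))
              · intro i _
                rw [hf'app _ (pvNode_ne2 k x i hx0 hkx hkne2x (hmin k hkK'))]
              · have h1 := pvM_le (x :: K') k
                rw [hlen] at hF h1
                omega
              · have h1 := pvM_le K' k
                rw [hlen] at hF
                omega
          unfold aAll
          rw [pvAll_perm K' _ (aConj K' f' (F''+2)) hperm,
              pvAll_perm K' _ (aConj (x :: K') f (F''+2)) hperm]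
          simp only [List.all_cons]
          -- the 2*x conjunct in the old context is trivially true
          rw [aConj_of_head_false (K := x :: K') f (F''+2) (pvHead_double_mem _ x hxmem)]
          rw [Bool.true_and]
          -- the 2*x conjunct in the new context is the continued chain
          have hhead2x' : aHead K' (2*x) = true := by
            apply pvHead_of_half_not_mem
            intro m hm hmK
            have hmx : m = x := by omega
            exact hxK' (hmx ▸ hmK)
          rw [aConj_of_head_true _ _ hhead2x']
          rw [aChain_succ_mem _ _ _ _ _ h2xK']
          rw [hf'2x]
          rw [if_neg (by omega : ¬ (0 : Int) > f (2*x) - f x), sub_zero]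
          -- continued chain equal in the two contexts
          have hchain : aChain (x :: K') f F'' (2*(2*x)) (f (2*x) - f x) =
              aChain K' f' (F''+1) (2*(2*x)) (f (2*x) - f x) := by
            apply pvChain_ext _ _ _ _ _ _ _ _ (by omega : (2*(2*x) : Int) ≠ 0)
            · intro i
              exact pvMem_cons_ne _ _ _ (pvXnode_ne x hx0 i).1
            · intro i _
              rw [hf'app _ (pvXnode_ne x hx0 i).2]
            · have h1 := pvM_lt (x :: K') (2*x) (by omega) h2xK
              have h2 := pvM_lt (x :: K') x hx0 hxmem
              have h3 := pvM_le (x :: K') x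
              rw [hlen] at hF h3
              omega
            · have h1 := pvM_lt K' (2*x) (by omega) h2xK'
              have h2 := pvM_le K' (2*x)
              rw [hlen] at hF
              omega
          rw [pvAll_congr E _ _ hconj, ← hchain]
      · -- the chain leaves the keys right after x
        have h2xK : (2*x) ∉ x :: K' := by
          intro h
          rcases List.mem_cons.1 h with he | he
          · exact h2xnex he
          · exact h2xK' he
        have hf2x : f (2*x) = 0 := hzero x hxmem h2xK
        obtain ⟨F'', rfl⟩ : ∃ F'', F' = F'' + 1 := ⟨F' - 1, by rw [hlen] at hF; omega⟩
        rw [aChain_succ_not_mem _ _ _ _ _ h2xK]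
        rw [hf2x]
        by_cases hfx : f x = 0
        · rw [if_neg (by omega : ¬ f x > (0:Int))]
          have hfeq : Function.update f (2*x) (0 - f x) = f := by
            funext w
            rw [Function.update_apply]
            split_ifs with h
            · rw [h, hf2x, hfx]; norm_num
            · rfl
          rw [hfeq]
          have hih := ih f (F'' + 2) hpK' hndK'
            (fun k hk => hpos k (List.mem_cons_of_mem _ hk))
            (by
              intro y hy h2y
              apply hzero y (List.mem_cons_of_mem _ hy)
              intro hmem
              rcases List.mem_cons.1 hmem with he | he
              · exact h2y_notmem y hy he
              · exact h2y he)
            (by rw [hlen] at hF; omega)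
          rw [hih]
          rw [show (f x == 0) = true from by simp [hfx]]
          rw [Bool.true_and]
          unfold aAll
          symm
          apply pvAll_congr
          intro k hk
          have hk0 : k ≠ 0 := fun h => h0K' (h ▸ hk)
          have hkx : k ≠ x := fun h => hxK' (h ▸ hk)
          apply pvConj_congr
          · apply pvHead_congr
            intro hpar
            have hpk := pvPar k hpar
            have hfdx : PySem.Int.floordiv k 2 ≠ x := by
              intro h0
              rw [h0] at hpk
              have : k = 2*x := by omega
              exact h2xK' (this ▸ hk)
            exact pvMem_cons_ne _ _ _ hfdx
          · apply pvChain_ext _ _ _ _ _ _ _ _ hk0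
            · intro i
              exact pvMem_cons_ne _ _ _ (pvNode_ne k x i hk0 hkx (hmin k hk))
            · intro i _
              rfl
            · have h1 := pvM_le (x :: K') k
              rw [hlen] at hF h1
              omega
            · have h1 := pvM_le K' k
              rw [hlen] at hF
              omega
        · rw [if_pos (by omega : f x > (0:Int))]
          rw [show (f x == 0) = false from by simp [hfx]]
          simp

-- simulation: the Dict chain walk of port B computes the abstract chain walk
lemma pvContains_aMem (d : PySem.Dict Int Int) (w : Int) :
    d.contains w = aMem d.keys w := by
  rw [PySem.Dict.contains_eq_decide_mem_keys, pvMem_aMem]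

lemma pvSimChainB (d : PySem.Dict Int Int) :
    ∀ (n : Nat) (v c : Int),
      pvChainB d n v c = aChain d.keys (fun w => d.getD w 0) n v c := by
  intro n
  induction n with
  | zero => intro v c; rfl
  | succ n ih =>
    intro v c
    simp only [pvChainB, aChain, pvContains_aMem d v]
    cases hm : aMem d.keys v with
    | false => rw [if_neg Bool.false_ne_true, if_neg Bool.false_ne_true]
    | true =>
      rw [if_pos rfl, if_pos rfl]
      by_cases hc : c > d.getD v 0
      · rw [if_pos hc, if_pos hc]
      · rw [if_neg hc, if_neg hc, ih]

lemma pvSimLoopB (d : PySem.Dict Int Int) (F : Nat) :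
    ∀ ks : List Int,
      pvLoopBKeys d F ks = aAll d.keys (fun w => d.getD w 0) F ks := by
  intro ks
  induction ks with
  | nil => rfl
  | cons k rest ih =>
    simp only [pvLoopBKeys, aAll, List.all_cons, aConj, aHead, Bool.not_not,
      pvContains_aMem d (PySem.Int.floordiv k 2), ih, pvSimChainB d F k 0]
    cases hcond : (PySem.Int.mod k 2 == 0 && aMem d.keys (PySem.Int.floordiv k 2)) with
    | true =>
      rw [if_pos rfl]
      simp
    | false =>
      rw [if_neg Bool.false_ne_true]
      cases hch : aChain d.keys (fun w => d.getD w 0) F k 0 with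
      | true => rw [if_pos rfl]; simp
      | false => rw [if_neg Bool.false_ne_true]; simp

-- ===== VERDICT (by name: the statement is the Claim_ definition above) =====
theorem canReorderDoubled_spec : Claim_equal_canReorderDoubled := by
  intro arr _
  unfold Spec_canReorderDoubled
  unfold canReorderDoubled canReorderDoubled_alt
  simp only []
  set f0 : Int → Int := fun k => (arr.count k : Int) with hf0
  have hcnt : ∀ k, (PySem.Dict.counter arr).getD k 0 = f0 k := by
    intro k; rw [PySem.Dict.getD_counter]
  have hfeq : (fun w => (PySem.Dict.counter arr).getD w 0) = f0 := funext hcnt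
  rw [pvSimA _ _ _ hcnt, pvSimLoopB, hfeq]
  have hkeys : (PySem.Dict.counter arr).keys = PySem.Set.ofList arr :=
    PySem.Dict.keys_counter arr
  rw [hkeys]
  set K0 := PySem.Set.ofList arr with hK0
  set F := K0.length + 1 with hFdef
  set L := PySem.List.sorted arr (fun y => |y|) with hL
  set K := PySem.List.sorted K0 (fun y => |y|) with hK
  have hLperm : L.Perm arr := PySem.List.sorted_perm arr (fun y => |y|) false
  have hKperm : K.Perm K0 := PySem.List.sorted_perm _ (fun y => |y|) false
  have hK0nodup : K0.Nodup := PySem.Set.nodup_ofList arr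
  have hKnodup : K.Nodup := hKperm.symm.nodup hK0nodup
  have hmemEq : ∀ v, aMem K v = aMem K0 v := by
    intro v
    rw [pvMem_aMem, pvMem_aMem, decide_eq_decide]
    exact hKperm.mem_iff
  have hlenK : K.length = K0.length := hKperm.length_eq
  -- A's per-element loop equals the grouped loop over the abs-sorted keys
  have hA : pvA f0 L = pvB f0 K := by
    apply pvMain K L f0 f0
    · exact PySem.List.sorted_pairwise arr (fun y => |y|)
    · exact PySem.List.sorted_pairwise _ (fun y => |y|)
    · exact hKnodup
    · intro k
      rw [hKperm.mem_iff, hLperm.mem_iff, hK0, PySem.Set.mem_ofList]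
    · intro k _; rw [hf0]; exact Int.natCast_nonneg _
    · intro k _
      rw [hLperm.count_eq, hf0]
    · intro k _; exact ⟨rfl, rfl⟩
  -- the grouped loop equals the chain decomposition over the sorted keys
  have hB : pvB f0 K = aAll K f0 F K := by
    apply pvBulkChains K f0 F
    · exact PySem.List.sorted_pairwise _ (fun y => |y|)
    · exact hKnodup
    · intro k _; rw [hf0]; exact Int.natCast_nonneg _
    · intro y _ h2y
      rw [hKperm.mem_iff, hK0, PySem.Set.mem_ofList] at h2y
      rw [hf0]
      exact_mod_cast congrArg _ (List.count_eq_zero.2 h2y)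
    · omega
  -- the chain decomposition does not depend on the order of the keys
  have hC : aAll K f0 F K = aAll K0 f0 F K0 := by
    have hstep : List.all K (aConj K f0 F) = List.all K (aConj K0 f0 F) := by
      apply pvAll_congr
      intro k hkK
      by_cases hk0 : k = 0
      · subst hk0
        have h1 : aHead K 0 = false := by
          have := pvHead_double_mem K 0 hkK
          simpa using this
        have h2 : aHead K0 0 = false := by
          have := pvHead_double_mem K0 0 (hKperm.mem_iff.1 hkK)
          simpa using this
        rw [aConj_of_head_false _ _ h1, aConj_of_head_false _ _ h2]
      · apply pvConj_congr
        · apply pvHead_congr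
          intro _
          exact hmemEq _
        · apply pvChain_ext _ _ _ _ _ _ _ _ hk0
          · intro i; exact hmemEq _
          · intro i _; rfl
          · have := pvM_le K k
            omega
          · have := pvM_le K0 k
            omega
    unfold aAll
    rw [hstep]
    exact pvAll_perm _ _ _ hKperm
  rw [hA, hB, hC]
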